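-- pv_equiv track=rewrite | github.com/pokerdio/generic | euler/euler-704.py | twos_fact_naive
-- ===== SOURCE A (Python) =====
-- def twos_fact_naive(n):
--     f = 1
--     for i in range(2, n + 1):
--         f *= i
--     ret = 0
--     while f % 2 == 0:
--         f //= 2
--         ret += 1
--     return ret
-- ===== SOURCE B (Python) =====
-- def twos_fact_naive(n):
--     # Legendre's formula: v2(n!) = sum_{k>=1} floor(n / 2^k), computed by
--     # repeated halving -- no factorial is ever built.
--     total = 0
--     while n > 1:
--         n //= 2
--         total += n
--     return total
-- ===== Notes on version B (the rewrite author's own statement) =====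
-- stated objective: faster
-- what changed: Replaces building n! and stripping its factors of 2 with Legendre's formula computed by repeated halving (sum of floor(n/2^k)), so no factorial is ever computed.
import Mathlib
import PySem

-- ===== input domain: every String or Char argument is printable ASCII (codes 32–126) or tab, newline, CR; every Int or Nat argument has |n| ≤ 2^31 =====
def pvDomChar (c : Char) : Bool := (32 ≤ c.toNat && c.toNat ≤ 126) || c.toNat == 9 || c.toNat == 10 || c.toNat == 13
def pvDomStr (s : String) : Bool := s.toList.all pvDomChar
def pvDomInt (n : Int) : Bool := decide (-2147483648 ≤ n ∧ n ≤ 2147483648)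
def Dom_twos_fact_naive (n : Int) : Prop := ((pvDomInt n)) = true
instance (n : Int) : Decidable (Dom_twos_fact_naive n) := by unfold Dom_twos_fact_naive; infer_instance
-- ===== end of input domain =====

-- B replaces the factorial-then-strip-twos computation with Legendre's formula by repeated
-- halving (objective: faster — the A-side factorial build disappears entirely).

-- ===== PORT A =====
-- the 'while f % 2 == 0' loop; the 'f ≠ 0' conjunct is a totality guard only (Python
-- diverges at f = 0, a state this program never reaches since f is a product of a
-- range starting at 2, hence ≥ 1)
def pvTwosLoopA (f ret : Int) : Int :=
  if h : f ≠ 0 ∧ PySem.Int.mod f 2 = 0 then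
    pvTwosLoopA (PySem.Int.floordiv f 2) (ret + 1)
  else ret
termination_by f.natAbs
decreasing_by
  obtain ⟨k, rfl⟩ : (2 : Int) ∣ f := (PySem.Int.mod_eq_zero_iff_dvd f 2).mp h.2
  have hd : PySem.Int.floordiv (2 * k) 2 = k := by
    rw [PySem.Int.floordiv]; exact Int.mul_fdiv_cancel_left k (by norm_num)
  rw [hd]; have := h.1; omega

def twos_fact_naive (n : Int) : Int :=
  let f := (PySem.List.pyRange 2 (n + 1) 1).foldl (fun f i => f * i) 1
  pvTwosLoopA f 0

-- ===== PORT B =====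
-- the 'while n > 1: n //= 2; total += n' loop
def pvLegendreLoop (n total : Int) : Int :=
  if 1 < n then pvLegendreLoop (PySem.Int.floordiv n 2) (total + PySem.Int.floordiv n 2)
  else total
termination_by n.toNat
decreasing_by
  have : PySem.Int.floordiv n 2 = n / 2 := PySem.Int.floordiv_eq_ediv_of_pos (by norm_num)
  rw [this]; omega

def twos_fact_naive_alt (n : Int) : Int := pvLegendreLoop n 0

-- ===== PRECONDITION & SPEC =====
def Spec_twos_fact_naive (n : Int) (out : Int) : Prop := out = twos_fact_naive_alt n
instance (n : Int) (out : Int) : Decidable (Spec_twos_fact_naive n out) := by unfold Spec_twos_fact_naive; infer_instance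

-- ===== CLAIM (what is proved, stated in full; the proofs are below) =====
def Claim_equal_twos_fact_naive : Prop := ∀ (n : Int), Dom_twos_fact_naive n → Spec_twos_fact_naive n (twos_fact_naive n)

-- ===== LEMMAS AND PROOFS =====

-- A's product over range(2, n+1) is m! (for n = m : Nat)
theorem pv_fold_factorial (m : Nat) :
    (PySem.List.pyRange 2 ((m : Int) + 1) 1).foldl (fun f i => f * i) 1 = ((Nat.factorial m : Nat) : Int) := by
  induction m with
  | zero =>
    rw [PySem.List.pyRange_one_eq_nil (by norm_num)]; simp [Nat.factorial]
  | succ k ih =>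
    rcases Nat.eq_zero_or_pos k with rfl | hk
    · rw [PySem.List.pyRange_one_eq_nil (by norm_num)]; simp [Nat.factorial]
    · rw [show ((k + 1 : Nat) : Int) + 1 = ((k : Int) + 1) + 1 by push_cast; ring,
        PySem.List.pyRange_one_succ_right (by omega)]
      rw [List.foldl_append, ih]
      simp [Nat.factorial_succ]
      ring

-- trailing-twos count of a positive integer m is padicValNat 2 m
theorem pv_loopA_val (m : Nat) (hm : 0 < m) : ∀ r : Int,
    pvTwosLoopA (m : Int) r = r + padicValNat 2 m := by
  haveI : Fact (Nat.Prime 2) := ⟨Nat.prime_two⟩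
  induction m using Nat.strong_induction_on with
  | _ m ih =>
    intro r
    rw [pvTwosLoopA]
    rcases Nat.even_or_odd m with he | ho
    · obtain ⟨k, rfl⟩ := he
      have hk : 0 < k := by omega
      have hcast : ((k + k : Nat) : Int) = 2 * (k : Int) := by push_cast; ring
      rw [dif_pos]
      · have hdiv : PySem.Int.floordiv ((k + k : Nat) : Int) 2 = (k : Int) := by
          rw [hcast, PySem.Int.floordiv_eq_ediv_of_pos (by norm_num),
            Int.mul_ediv_cancel_left _ (by norm_num)]
        rw [hdiv, ih k (by omega) hk (r + 1)]
        have hv : padicValNat 2 (k + k) = padicValNat 2 k + 1 := by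
          rw [show k + k = 2 * k by ring,
            padicValNat.mul (by norm_num) (by omega), padicValNat.self (by norm_num)]
          ring
        rw [hv]; push_cast; ring
      · constructor
        · rw [hcast]; omega
        · rw [hcast]
          exact (PySem.Int.mod_eq_zero_iff_dvd _ _).mpr (Dvd.intro _ rfl)
    · rw [dif_neg]
      · have hv : padicValNat 2 m = 0 := padicValNat.eq_zero_of_not_dvd (by
          have := Nat.odd_iff.mp ho
          rw [Nat.two_dvd_ne_zero]; omega)
        rw [hv]; push_cast; ring
      · rintro ⟨-, hmod⟩
        have h2 : (2 : Int) ∣ (m : Int) := (PySem.Int.mod_eq_zero_iff_dvd _ _).mp hmod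
        have h2' : 2 ∣ m := by exact_mod_cast h2
        have := Nat.odd_iff.mp ho
        omega

-- B's loop computes padicValNat 2 (m!)
theorem pv_loopB_val (m : Nat) : ∀ t : Int,
    pvLegendreLoop (m : Int) t = t + padicValNat 2 (Nat.factorial m) := by
  haveI : Fact (Nat.Prime 2) := ⟨Nat.prime_two⟩
  induction m using Nat.strong_induction_on with
  | _ m ih =>
    intro t
    rw [pvLegendreLoop]
    by_cases hm : m ≤ 1
    · rw [if_neg (by omega)]
      interval_cases m <;> simp [Nat.factorial]
    · rw [if_pos (by omega)]
      have hdiv : PySem.Int.floordiv (m : Int) 2 = ((m / 2 : Nat) : Int) := by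
        exact_mod_cast PySem.Int.floordiv_natCast m 2
      rw [hdiv, ih (m / 2) (by omega) (t + ((m / 2 : Nat) : Int))]
      have hv : padicValNat 2 (Nat.factorial m) = padicValNat 2 (Nat.factorial (m / 2)) + m / 2 := by
        rw [← padicValNat_mul_div_factorial (p := 2) m, padicValNat_factorial_mul]
      rw [hv]; push_cast; ring

theorem pv_loopB_neg (n : Int) (hn : n ≤ 1) : pvLegendreLoop n 0 = 0 := by
  rw [pvLegendreLoop, if_neg (by omega)]

-- ===== VERDICT (by name: the statement is the Claim_ definition above) =====
theorem twos_fact_naive_spec : Claim_equal_twos_fact_naive := by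
  intro n _
  unfold Spec_twos_fact_naive twos_fact_naive twos_fact_naive_alt
  by_cases hn : n ≤ 1
  · rw [PySem.List.pyRange_one_eq_nil (by omega)]
    simp only [List.foldl_nil]
    rw [pvTwosLoopA, dif_neg (by decide), pv_loopB_neg n hn]
  · obtain ⟨m, rfl⟩ : ∃ m : Nat, n = (m : Int) := ⟨n.toNat, (Int.toNat_of_nonneg (by omega)).symm⟩
    simp only [pv_fold_factorial m]
    rw [pv_loopA_val (Nat.factorial m) m.factorial_pos 0, pv_loopB_val m 0]
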